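-- pv_equiv track=rewrite | github.com/speedy8Kit/ModelKnowledgeBase | training.py | interpretPDTime
-- ===== SOURCE A (Python) =====
-- def interpretPDTime(
--                       arr: list[tuple[int, int]]):
--     # [(1, 23), (3, 44), (20, 57), (24, 77)]
--     ans = []
--     for i in range(len(arr)):
--         if i != 0:
--             max = arr[i][1] - arr[i-1][1]
--         else:
--             max = arr[i][1]
--
--         if i != len(arr)-1:
--             min = arr[i+1][0] - arr[i][0]
--         else:
--             min = int(max / 2)
--
--
--         ans.append((min, max))
--     return ans
-- ===== SOURCE B (Python) =====
-- def interpretPDTime(arr: list[tuple[int, int]]):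
--     # Online one-pass: stream the elements carrying the previous element as
--     # "pending" state; each element's min is only known when its successor
--     # arrives, so the pending entry is emitted then (the final one gets
--     # int(max / 2)).  No indexing at all.
--     out = []
--     pending = None  # (x, y, mx): most recent element and its max, min not yet known
--     for x, y in arr:
--         if pending is None:
--             mx = y
--         else:
--             px, py, pmx = pending
--             out.append((x - px, pmx))
--             mx = y - py
--         pending = (x, y, mx)
--     if pending is not None:
--         out.append((int(pending[2] / 2), pending[2]))
--     return out
-- ===== Notes on version B (the rewrite author's own statement) =====
-- stated objective: alternative
-- what changed: Replaces A's index-driven loop over range(len(arr)) with i-1/i+1 lookups by an online one-pass stream that carries the previous element as pending state and emits each entry's (min, max) only when its successor arrives (the last entry on flush), using no indexing at all.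
import Mathlib
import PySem

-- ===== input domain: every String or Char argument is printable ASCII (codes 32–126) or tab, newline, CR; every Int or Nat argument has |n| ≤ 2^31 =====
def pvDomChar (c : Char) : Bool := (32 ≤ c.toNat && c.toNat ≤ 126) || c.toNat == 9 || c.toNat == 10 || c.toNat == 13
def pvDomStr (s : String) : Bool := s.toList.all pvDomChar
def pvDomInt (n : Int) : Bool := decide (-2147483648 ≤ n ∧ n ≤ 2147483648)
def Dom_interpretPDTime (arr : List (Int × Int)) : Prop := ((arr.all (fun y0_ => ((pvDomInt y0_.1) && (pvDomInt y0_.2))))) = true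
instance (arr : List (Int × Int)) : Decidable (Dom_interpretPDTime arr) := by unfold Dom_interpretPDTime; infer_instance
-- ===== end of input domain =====

-- B replaces A's index-driven loop (i-1/i+1 lookups per index) by an online one-pass
-- stream carrying the previous element as pending state, emitting each entry when its
-- successor arrives; same O(n) cost, different decomposition.  On Dom's |int| ≤ 2^31
-- inputs Python's 'int(max / 2)' is exact float halving truncated toward zero,
-- ported as Int.tdiv _ 2 in both ports.

-- ===== PORT A =====
def interpretPDTime (arr : List (Int × Int)) : List (Int × Int) :=
  (List.range arr.length).foldl
    (fun ans i =>
      let mx : Int :=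
        if i ≠ 0 then (arr.getD i (0, 0)).2 - (arr.getD (i - 1) (0, 0)).2
        else (arr.getD i (0, 0)).2
      let mn : Int :=
        if i ≠ arr.length - 1 then (arr.getD (i + 1) (0, 0)).1 - (arr.getD i (0, 0)).1
        else Int.tdiv mx 2
      ans ++ [(mn, mx)]) []

-- ===== PORT B =====
-- loop body of Source B: state = (out, pending) with pending = some (x, y, mx)
def pvStepB (s : List (Int × Int) × Option (Int × Int × Int)) (xy : Int × Int) :
    List (Int × Int) × Option (Int × Int × Int) :=
  match s with
  | (out, none) => (out, some (xy.1, xy.2, xy.2))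
  | (out, some (px, py, pmx)) =>
      (out ++ [(xy.1 - px, pmx)], some (xy.1, xy.2, xy.2 - py))

-- the trailing 'if pending is not None: out.append(...)' of Source B
def pvFinishB (s : List (Int × Int) × Option (Int × Int × Int)) : List (Int × Int) :=
  match s with
  | (out, none) => out
  | (out, some (_, _, pmx)) => out ++ [(Int.tdiv pmx 2, pmx)]

def interpretPDTime_alt (arr : List (Int × Int)) : List (Int × Int) :=
  pvFinishB (arr.foldl pvStepB ([], none))

-- ===== PRECONDITION & SPEC =====
def Spec_interpretPDTime (arr : List (Int × Int)) (out : List (Int × Int)) : Prop := out = interpretPDTime_alt arr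
instance (arr : List (Int × Int)) (out : List (Int × Int)) : Decidable (Spec_interpretPDTime arr out) := by unfold Spec_interpretPDTime; infer_instance

-- ===== CLAIM (what is proved, stated in full; the proofs are below) =====
def Claim_equal_interpretPDTime : Prop := ∀ (arr : List (Int × Int)), Dom_interpretPDTime arr → Spec_interpretPDTime arr (interpretPDTime arr)

-- ===== LEMMAS AND PROOFS =====

-- the common closed form: entry i of the answer (A's loop body as a function of i)
def pvEntry (arr : List (Int × Int)) (i : Nat) : Int × Int :=
  let mx : Int :=
    if i ≠ 0 then (arr.getD i (0, 0)).2 - (arr.getD (i - 1) (0, 0)).2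
    else (arr.getD i (0, 0)).2
  let mn : Int :=
    if i ≠ arr.length - 1 then (arr.getD (i + 1) (0, 0)).1 - (arr.getD i (0, 0)).1
    else Int.tdiv mx 2
  (mn, mx)

-- A's 'max' at index i
def pvMx (arr : List (Int × Int)) (i : Nat) : Int :=
  if i ≠ 0 then (arr.getD i (0, 0)).2 - (arr.getD (i - 1) (0, 0)).2
  else (arr.getD i (0, 0)).2

theorem portA_eq_map (arr : List (Int × Int)) :
    interpretPDTime arr = (List.range arr.length).map (pvEntry arr) := by
  unfold interpretPDTime
  rw [PySem.List.foldl_append_singleton_eq_map]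
  rfl

-- recursive closed form of B's loop from a pending state (px, py, pmx)
def pvSpecAux (px py pmx : Int) : List (Int × Int) → List (Int × Int)
  | [] => [(Int.tdiv pmx 2, pmx)]
  | (x, y) :: l => (x - px, pmx) :: pvSpecAux x y (y - py) l

theorem finish_foldl (l : List (Int × Int)) :
    ∀ (out : List (Int × Int)) (px py pmx : Int),
      pvFinishB (l.foldl pvStepB (out, some (px, py, pmx))) = out ++ pvSpecAux px py pmx l := by
  induction l with
  | nil => intro out px py pmx; simp [pvFinishB, pvSpecAux]
  | cons hd tl ih =>
    intro out px py pmx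
    obtain ⟨x, y⟩ := hd
    simp only [List.foldl_cons, pvStepB, pvSpecAux, ih]
    simp

theorem specAux_eq_map (arr : List (Int × Int)) :
    ∀ (j : Nat), j < arr.length →
      pvSpecAux (arr.getD j (0, 0)).1 (arr.getD j (0, 0)).2 (pvMx arr j) (arr.drop (j + 1))
        = (List.range' j (arr.length - j)).map (pvEntry arr) := by
  intro j hj
  induction hn : arr.length - j generalizing j with
  | zero => omega
  | succ k ih =>
    rcases Nat.lt_or_ge (j + 1) arr.length with hlt | hge
    · -- drop (j+1) = arr[j+1] :: drop (j+2)
      have hdrop : arr.drop (j + 1) = arr[j + 1] :: arr.drop (j + 2) := by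
        rw [List.drop_eq_getElem_cons hlt]
      rcases h : arr[j + 1]'hlt with ⟨x, y⟩
      rw [h] at hdrop
      rw [hdrop]
      have hk : arr.length - (j + 1) = k := by omega
      have hrec := ih (j + 1) hlt hk
      have hget1 : arr.getD (j + 1) (0, 0) = (x, y) := by
        rw [List.getD_eq_getElem?_getD, List.getElem?_eq_getElem hlt, h]; rfl
      have hg1 : (arr.getD (j + 1) (0, 0)).1 = x := by rw [hget1]
      have hg2 : (arr.getD (j + 1) (0, 0)).2 = y := by rw [hget1]
      have hmx1 : pvMx arr (j + 1) = y - (arr.getD j (0, 0)).2 := by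
        unfold pvMx
        rw [if_pos (show j + 1 ≠ 0 by omega), hg2]
        norm_num
      rw [hg1, hg2, hmx1, show j + 1 + 1 = j + 2 from rfl] at hrec
      simp only [pvSpecAux]
      rw [hrec]
      have hrange : List.range' j (k + 1) = j :: List.range' (j + 1) k := by
        rw [List.range'_succ]
      rw [hrange, List.map_cons]
      congr 1
      simp only [pvEntry, pvMx]
      have hne : j ≠ arr.length - 1 := by omega
      simp [hne]
      rw [List.getElem?_eq_getElem hlt, h]
      rfl
    · -- j is the last index
      have hj' : j = arr.length - 1 := by omega
      have hdrop : arr.drop (j + 1) = [] := by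
        apply List.drop_eq_nil_of_le; omega
      have hk0 : k = 0 := by omega
      subst hk0
      rw [hdrop]
      simp only [pvSpecAux]
      congr 1
      simp only [pvEntry, pvMx]
      simp [hj']

theorem portB_eq_map (arr : List (Int × Int)) :
    interpretPDTime_alt arr = (List.range arr.length).map (pvEntry arr) := by
  cases arr with
  | nil => rfl
  | cons hd tl =>
    obtain ⟨x, y⟩ := hd
    have h0 : 0 < ((x, y) :: tl).length := by simp
    have := specAux_eq_map ((x, y) :: tl) 0 h0
    simp only [List.getD_cons_zero, List.drop_succ_cons, List.drop_zero, pvMx,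
      ne_eq, not_true_eq_false, reduceIte] at this
    simp only [interpretPDTime_alt, List.foldl_cons, pvStepB]
    rw [finish_foldl tl [] x y y]
    rw [List.nil_append]
    rw [this]
    congr 1
    rw [List.range_eq_range']
    simp

-- ===== VERDICT (by name: the statement is the Claim_ definition above) =====
theorem interpretPDTime_spec : Claim_equal_interpretPDTime := by
  intro arr _
  unfold Spec_interpretPDTime
  rw [portA_eq_map, portB_eq_map]
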